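-- pv_equiv track=rewrite | github.com/laci-123/aoc2024 | day_07/second.py | check_equation_imp
-- ===== SOURCE A (Python) =====
-- def number_of_digits(x):
--     digits = 0
--     while x >= 1:
--         x = x // 10
--         digits += 1
--     return digits
--
-- def check_equation_imp(result, numbers, acc, operator):
--     if len(numbers) == 0:
--         return False
--
--     match operator:
--         case "+":
--             acc += numbers[0]
--         case "*":
--             acc *= numbers[0]
--         case "|":
--             x = numbers[0]
--             e = number_of_digits(x)
--             acc = (10 ** e) * acc + x
--
--     if acc > result:
--         return False
--     elif acc == result and len(numbers) == 1:
--         return True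
--     else:
--         return check_equation_imp(result, numbers[1:], acc, "+") or check_equation_imp(result, numbers[1:], acc, "*") or check_equation_imp(result, numbers[1:], acc, "|")
-- ===== SOURCE B (Python) =====
-- def number_of_digits(x):
--     digits = 0
--     while x >= 1:
--         x = x // 10
--         digits += 1
--     return digits
--
--
-- def _apply(op, a, n):
--     if op == "+":
--         return a + n
--     if op == "*":
--         return a * n
--     if op == "|":
--         return (10 ** number_of_digits(n)) * a + n
--     return a
--
--
-- def check_equation_imp(result, numbers, acc, operator):
--     # Breadth-first over the set of reachable accumulator values instead of
--     # triple-branching recursion; values > result are pruned exactly as A prunes.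
--     if not numbers:
--         return False
--     vals = {v for v in (_apply(operator, acc, numbers[0]),) if v <= result}
--     for n in numbers[1:]:
--         vals = {w for v in vals
--                   for w in (v + n, v * n, _apply("|", v, n))
--                   if w <= result}
--     return result in vals
-- ===== Notes on version B (the rewrite author's own statement) =====
-- stated objective: alternative
-- what changed: Replaces A's triple-branching recursion (one call per operator choice) with a single forward pass that maintains the set of reachable accumulator values, pruning values above result exactly as A does; duplicates collapse, so repeated work disappears.
import Mathlib
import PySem

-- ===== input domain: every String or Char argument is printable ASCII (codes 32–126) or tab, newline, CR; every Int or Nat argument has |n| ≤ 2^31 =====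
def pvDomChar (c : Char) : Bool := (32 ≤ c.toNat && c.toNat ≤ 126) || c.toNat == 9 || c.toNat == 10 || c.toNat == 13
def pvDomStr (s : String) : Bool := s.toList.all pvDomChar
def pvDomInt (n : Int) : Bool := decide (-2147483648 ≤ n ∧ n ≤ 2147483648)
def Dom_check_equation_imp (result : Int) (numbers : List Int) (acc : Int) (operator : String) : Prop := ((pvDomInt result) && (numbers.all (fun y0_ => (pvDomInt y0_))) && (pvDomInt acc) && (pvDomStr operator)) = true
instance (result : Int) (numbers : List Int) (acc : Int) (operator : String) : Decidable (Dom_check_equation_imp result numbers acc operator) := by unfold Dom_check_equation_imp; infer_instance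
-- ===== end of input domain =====

-- B replaces A's triple-branching recursion by one forward pass over a set of
-- reachable accumulator values (objective: alternative algorithm, same results).

-- ===== PORT A =====
-- while x >= 1: x = x // 10; digits += 1   (Python // = floor division)
def number_of_digits_loop (x : Int) (digits : Int) : Int :=
  if h : x ≥ 1 then number_of_digits_loop (PySem.Int.floordiv x 10) (digits + 1) else digits
termination_by x.toNat
decreasing_by
  have he : PySem.Int.floordiv x 10 = x / 10 := PySem.Int.floordiv_eq_ediv_of_pos (by norm_num)
  omega

def number_of_digits (x : Int) : Int := number_of_digits_loop x 0

-- 10 ** e in Python; e = number_of_digits x is always ≥ 0, so ^ on toNat is exact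
def check_equation_imp (result : Int) (numbers : List Int) (acc : Int) (operator : String) : Bool :=
  match numbers with
  | [] => false
  | n :: rest =>
    let acc' : Int :=
      if operator = "+" then acc + n
      else if operator = "*" then acc * n
      else if operator = "|" then (10 ^ (number_of_digits n).toNat) * acc + n
      else acc
    if acc' > result then false
    else if acc' = result ∧ rest = [] then true
    else check_equation_imp result rest acc' "+" || check_equation_imp result rest acc' "*" ||
         check_equation_imp result rest acc' "|"

-- ===== PORT B =====
def ceiApply (op : String) (a n : Int) : Int :=
  if op = "+" then a + n
  else if op = "*" then a * n
  else if op = "|" then (10 ^ (number_of_digits n).toNat) * a + n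
  else a

-- the set comprehension expanding every reachable value by the three operators
def ceiStep (result : Int) (s : PySem.Set Int) (n : Int) : PySem.Set Int :=
  PySem.Set.ofList ((s.flatMap (fun v => [v + n, v * n, ceiApply "|" v n])).filter (fun w => w ≤ result))

def check_equation_imp_alt (result : Int) (numbers : List Int) (acc : Int) (operator : String) : Bool :=
  match numbers with
  | [] => false
  | n :: rest =>
    let init : PySem.Set Int :=
      PySem.Set.ofList ([ceiApply operator acc n].filter (fun v => v ≤ result))
    let vals := rest.foldl (ceiStep result) init
    PySem.Set.contains vals result

-- ===== PRECONDITION & SPEC =====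
def Spec_check_equation_imp (result : Int) (numbers : List Int) (acc : Int) (operator : String) (out : Bool) : Prop := out = check_equation_imp_alt result numbers acc operator
instance (result : Int) (numbers : List Int) (acc : Int) (operator : String) (out : Bool) : Decidable (Spec_check_equation_imp result numbers acc operator out) := by unfold Spec_check_equation_imp; infer_instance

-- ===== CLAIM (what is proved, stated in full; the proofs are below) =====
def Claim_equal_check_equation_imp : Prop := ∀ (result : Int) (numbers : List Int) (acc : Int) (operator : String), Dom_check_equation_imp result numbers acc operator → Spec_check_equation_imp result numbers acc operator (check_equation_imp result numbers acc operator)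

-- ===== LEMMAS AND PROOFS =====

-- semantic middle ground: can `result` be reached from value `a` over `rest`?
def reach (result : Int) (a : Int) (rest : List Int) : Bool :=
  if a > result then false
  else match rest with
    | [] => a == result
    | m :: rest' =>
      reach result (a + m) rest' || reach result (a * m) rest' || reach result (ceiApply "|" a m) rest'

theorem reach_of_gt {result a : Int} (rest : List Int) (h : a > result) :
    reach result a rest = false := by
  cases rest <;> simp [reach, h]

-- A computes `reach` of the operator applied to acc and the head
theorem checkA_cons (result : Int) (n : Int) (rest : List Int) (acc : Int) (op : String) :
    check_equation_imp result (n :: rest) acc op = reach result (ceiApply op acc n) rest := by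
  induction rest generalizing n acc op with
  | nil =>
      show (if ceiApply op acc n > result then false
            else if ceiApply op acc n = result ∧ ([] : List Int) = [] then true
            else check_equation_imp result [] (ceiApply op acc n) "+" ||
                 check_equation_imp result [] (ceiApply op acc n) "*" ||
                 check_equation_imp result [] (ceiApply op acc n) "|") =
          reach result (ceiApply op acc n) []
      by_cases h : ceiApply op acc n > result
      · simp [reach, h]
      · by_cases he : ceiApply op acc n = result <;>
          simp [reach, check_equation_imp, h, he]
  | cons m rest' ih =>
      show (if ceiApply op acc n > result then false
            else if ceiApply op acc n = result ∧ m :: rest' = [] then true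
            else check_equation_imp result (m :: rest') (ceiApply op acc n) "+" ||
                 check_equation_imp result (m :: rest') (ceiApply op acc n) "*" ||
                 check_equation_imp result (m :: rest') (ceiApply op acc n) "|") =
          reach result (ceiApply op acc n) (m :: rest')
      by_cases h : ceiApply op acc n > result
      · simp [reach, h]
      · rw [reach]
        simp only [h, if_false, List.cons_ne_nil, and_false, ih]
        simp [ceiApply]

-- BFS invariant: folding ceiStep over a set of values ≤ result tests reachability
theorem foldl_ceiStep_contains (result : Int) (rest : List Int) :
    ∀ (S : List Int), (∀ v ∈ S, v ≤ result) →
      PySem.Set.contains (rest.foldl (ceiStep result) S) result =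
        S.any (fun v => reach result v rest) := by
  induction rest with
  | nil =>
      intro S hS
      rw [Bool.eq_iff_iff]
      simp only [List.foldl_nil, PySem.Set.contains_iff, List.any_eq_true]
      constructor
      · intro hm
        exact ⟨result, hm, by simp [reach]⟩
      · rintro ⟨v, hv, hr⟩
        have hle := hS v hv
        simp [reach, show ¬ v > result by omega] at hr
        rwa [hr] at hv
  | cons m rest' ih =>
      intro S hS
      rw [List.foldl_cons]
      rw [ih (ceiStep result S m) (by
        intro v hv
        unfold ceiStep at hv
        rw [PySem.Set.mem_ofList] at hv
        exact (List.mem_filter.mp hv).2 |> of_decide_eq_true)]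
      rw [Bool.eq_iff_iff]
      simp only [List.any_eq_true]
      constructor
      · rintro ⟨w, hw, hr⟩
        unfold ceiStep at hw
        rw [PySem.Set.mem_ofList, List.mem_filter] at hw
        obtain ⟨hwm, _⟩ := hw
        rw [List.mem_flatMap] at hwm
        obtain ⟨v, hv, hwv⟩ := hwm
        refine ⟨v, hv, ?_⟩
        rw [reach]
        simp only [show ¬ v > result from by have := hS v hv; omega, if_false]
        simp only [List.mem_cons, List.not_mem_nil, or_false] at hwv
        rcases hwv with rfl | rfl | rfl <;> simp [hr]
      · rintro ⟨v, hv, hr⟩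
        rw [reach] at hr
        simp only [show ¬ v > result from by have := hS v hv; omega, if_false, Bool.or_eq_true] at hr
        have pick : ∃ w ∈ [v + m, v * m, ceiApply "|" v m], reach result w rest' = true := by
          rcases hr with (h | h) | h
          · exact ⟨v + m, by simp, h⟩
          · exact ⟨v * m, by simp, h⟩
          · exact ⟨ceiApply "|" v m, by simp, h⟩
        obtain ⟨w, hwm, hwr⟩ := pick
        have hwle : w ≤ result := by
          by_contra hgt
          rw [reach_of_gt rest' (by omega)] at hwr
          exact absurd hwr (by simp)
        refine ⟨w, ?_, hwr⟩
        unfold ceiStep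
        rw [PySem.Set.mem_ofList, List.mem_filter]
        exact ⟨List.mem_flatMap.mpr ⟨v, hv, hwm⟩, by simpa using hwle⟩

-- ===== VERDICT (by name: the statement is the Claim_ definition above) =====
theorem check_equation_imp_spec : Claim_equal_check_equation_imp := by
  intro result numbers acc op _
  unfold Spec_check_equation_imp
  cases numbers with
  | nil => rfl
  | cons n rest =>
      rw [checkA_cons]
      show reach result (ceiApply op acc n) rest =
        PySem.Set.contains
          (rest.foldl (ceiStep result)
            (PySem.Set.ofList ([ceiApply op acc n].filter (fun v => decide (v ≤ result))))) result
      rw [foldl_ceiStep_contains result rest _ (by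
        intro v hv
        rw [PySem.Set.mem_ofList, List.mem_filter] at hv
        exact of_decide_eq_true hv.2)]
      by_cases h : ceiApply op acc n ≤ result
      · simp [PySem.Set.ofList, h]
      · rw [reach_of_gt rest (by omega)]
        simp [PySem.Set.ofList, h]
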